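-- pv_equiv track=rewrite | github.com/ConteMassimiliano/SGD_variants | functions.py | create_blocks
-- ===== SOURCE A (Python) =====
-- def create_blocks(block_length, maximum):
--     '''
--     Return a list of lists of ordered natural numbers
--     for example:
--     block_length = 2
--     maximum = 5
--     returns the list  [ [0,1] , [2,3] , [4] ]
--     '''
--     blocks = []
--     for len in range(0, maximum, block_length):
--         if (len+block_length) > maximum:
--             blocks.append(list(range(len,maximum)))
--         else:
--             blocks.append(list(range(len,len+block_length)))
--     return blocks
-- ===== SOURCE B (Python) =====
-- def create_blocks(block_length, maximum):
--     # Build the partition back-to-front: repeatedly snap below the current top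
--     # with floor division to find the last block boundary, peel the top block
--     # off, and finally reverse; the short block is simply the first one peeled.
--     if block_length <= 0:
--         return []
--     blocks = []
--     while maximum > 0:
--         start = ((maximum - 1) // block_length) * block_length
--         blocks.append(list(range(start, maximum)))
--         maximum = start
--     blocks.reverse()
--     return blocks
-- ===== Notes on version B (the rewrite author's own statement) =====
-- stated objective: alternative
-- what changed: B builds the partition back-to-front: it repeatedly snaps below the current top with floor division to find the last block boundary, peels the top block off and prepends it, so there is no forward strided loop and no overrun conditional (the short block is simply the first one peeled).
-- outside the precondition, e.g. on create_blocks(-2, -5): A returns [[], [], []], B returns []; on create_blocks(0, 5): A raises ValueError, B returns []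
import Mathlib
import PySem

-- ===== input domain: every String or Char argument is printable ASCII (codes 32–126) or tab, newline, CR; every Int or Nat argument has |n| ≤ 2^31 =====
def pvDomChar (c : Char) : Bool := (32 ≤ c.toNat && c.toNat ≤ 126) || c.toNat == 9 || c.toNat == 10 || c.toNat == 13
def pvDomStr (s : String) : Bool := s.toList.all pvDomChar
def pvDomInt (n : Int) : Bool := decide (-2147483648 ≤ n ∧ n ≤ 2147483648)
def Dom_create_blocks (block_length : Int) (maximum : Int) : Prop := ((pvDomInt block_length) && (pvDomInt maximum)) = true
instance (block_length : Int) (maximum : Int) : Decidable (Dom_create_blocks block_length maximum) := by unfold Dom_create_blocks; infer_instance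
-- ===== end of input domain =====

-- B builds the partition back-to-front: floor division snaps below the current top to the
-- last block boundary, the top block is peeled off, and the list is reversed at the end,
-- instead of A's forward strided loop with an overrun check.

-- ===== PORT A =====
def create_blocks (block_length : Int) (maximum : Int) : List (List Int) :=
  (PySem.List.pyRange 0 maximum block_length).foldl
    (fun blocks len =>
      if len + block_length > maximum then
        blocks ++ [PySem.List.pyRange len maximum 1]
      else
        blocks ++ [PySem.List.pyRange len (len + block_length) 1]) []

-- ===== PORT B =====
-- the while loop of Source B; the fuel argument (maximum.toNat) only makes the loop a
-- structural recursion and never runs out while the loop condition still holds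
def altGo (block_length : Int) : Int → List (List Int) → Nat → List (List Int)
  | _, blocks, 0 => blocks
  | maximum, blocks, n + 1 =>
    if maximum > 0 then
      let start := (PySem.Int.floordiv (maximum - 1) block_length) * block_length
      altGo block_length start (blocks ++ [PySem.List.pyRange start maximum 1]) n
    else blocks

def create_blocks_alt (block_length : Int) (maximum : Int) : List (List Int) :=
  if block_length ≤ 0 then []
  else (altGo block_length maximum [] maximum.toNat).reverse

-- ===== PRECONDITION & SPEC =====
-- Pre_ excludes block_length = 0, where A's range(0, maximum, 0) raises ValueError, and the
-- corner block_length < 0 ∧ maximum < 0, where A's list of empty blocks is an accidental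
-- artefact of a negative stride and B's [] is as defensible on this unspecified corner.
def Pre_create_blocks (block_length : Int) (maximum : Int) : Prop :=
  block_length ≠ 0 ∧ (0 < block_length ∨ 0 ≤ maximum)
instance (block_length : Int) (maximum : Int) : Decidable (Pre_create_blocks block_length maximum) := by unfold Pre_create_blocks; infer_instance
def pvWitness_create_blocks : Int × Int := (2, 5)

def Spec_create_blocks (block_length : Int) (maximum : Int) (out : List (List Int)) : Prop := out = create_blocks_alt block_length maximum
instance (block_length : Int) (maximum : Int) (out : List (List Int)) : Decidable (Spec_create_blocks block_length maximum out) := by unfold Spec_create_blocks; infer_instance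

-- ===== CLAIM =====
def Claim_equal_create_blocks : Prop := ∀ (block_length : Int) (maximum : Int), Dom_create_blocks block_length maximum → Pre_create_blocks block_length maximum → Spec_create_blocks block_length maximum (create_blocks block_length maximum)

-- ===== LEMMAS AND PROOFS =====

theorem foldl_if_append {α β : Type} (p : α → Prop) [DecidablePred p] (f g : α → β)
    (l : List α) (acc : List β) :
    l.foldl (fun bs x => if p x then bs ++ [f x] else bs ++ [g x]) acc
      = acc ++ l.map (fun x => if p x then f x else g x) := by
  induction l generalizing acc with
  | nil => simp
  | cons a t ih =>
      simp only [List.foldl_cons, List.map_cons, ih]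
      by_cases h : p a <;> simp [h]

theorem pyRange_pos_eq_nil (a b s : Int) (hs : 0 < s) (hba : b ≤ a) :
    PySem.List.pyRange a b s = [] := by
  rw [PySem.List.pyRange_of_pos a b hs, if_neg (by omega)]
  simp

theorem pyRange_neg_eq_nil (a b s : Int) (hs : s < 0) (hab : a ≤ b) :
    PySem.List.pyRange a b s = [] := by
  simp only [PySem.List.pyRange, if_neg hs.ne]
  rw [if_neg (by omega), if_neg (by omega)]
  simp

-- A's map form: each block of the forward strided pass, with the overrun test folded into min
def aForm (block_length : Int) (maximum : Int) : List (List Int) :=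
  (PySem.List.pyRange 0 maximum block_length).map
    (fun i => PySem.List.pyRange i (min maximum (i + block_length)) 1)

-- splitting the strided range at the last block boundary start = ((m-1)/s)*s
theorem pyRange_split_top (m s : Int) (hs : 0 < s) (hm : 0 < m) :
    PySem.List.pyRange 0 m s
      = PySem.List.pyRange 0 (((m - 1) / s) * s) s ++ [((m - 1) / s) * s] := by
  have hq : 0 ≤ (m - 1) / s := Int.ediv_nonneg (by omega) (by omega)
  have hdm : (m - 0 + s - 1) / s = (m - 1) / s + 1 := by
    have h2 : m - 0 + s - 1 = m - 1 + 1 * s := by ring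
    rw [h2, Int.add_mul_ediv_right (m - 1) 1 hs.ne']
  rw [PySem.List.pyRange_of_pos 0 m hs, if_pos hm, hdm,
      PySem.List.pyRange_of_pos 0 (((m - 1) / s) * s) hs]
  have hcnt : ((m - 1) / s + 1).toNat = ((m - 1) / s).toNat + 1 := by omega
  rw [hcnt, List.range_succ, List.map_append, List.map_singleton]
  congr 1
  · -- the strided range up to start has exactly (m-1)/s entries
    by_cases h0 : (0:Int) < ((m - 1) / s) * s
    · rw [if_pos h0]
      congr 2
      have h3 : ((m - 1) / s) * s - 0 + s - 1 = (s - 1) + ((m - 1) / s) * s := by ring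
      rw [h3, Int.add_mul_ediv_right (s - 1) ((m - 1) / s) hs.ne']
      have hz : (s - 1) / s = 0 := Int.ediv_eq_zero_of_lt (by omega) (by omega)
      rw [hz]
      omega
    · rw [if_neg h0]
      have hq0 : (m - 1) / s = 0 := by nlinarith [not_lt.mp h0]
      rw [hq0]
      simp
  · have : (0:Int) + s * ((m - 1) / s).toNat = ((m - 1) / s) * s := by
      rw [Int.toNat_of_nonneg hq]; ring
    rw [this]

-- the facts about start = ((m-1)/s)*s used to peel the top block
theorem start_bounds (m s : Int) (hs : 0 < s) (hm : 0 < m) :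
    0 ≤ ((m - 1) / s) * s ∧ ((m - 1) / s) * s ≤ m - 1 ∧ m ≤ ((m - 1) / s) * s + s := by
  have hq : 0 ≤ (m - 1) / s := Int.ediv_nonneg (by omega) (by omega)
  have hmod := Int.mul_ediv_add_emod (m - 1) s
  have hr0 : 0 ≤ (m - 1) % s := Int.emod_nonneg (m - 1) hs.ne'
  have hrs : (m - 1) % s < s := Int.emod_lt_of_pos (m - 1) hs
  refine ⟨by positivity, by nlinarith, by nlinarith⟩

-- peeling the top block off A's map form
theorem aForm_split_top (m s : Int) (hs : 0 < s) (hm : 0 < m) :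
    aForm s m = aForm s (((m - 1) / s) * s)
      ++ [PySem.List.pyRange (((m - 1) / s) * s) m 1] := by
  obtain ⟨h0, h1, h2⟩ := start_bounds m s hs hm
  unfold aForm
  rw [pyRange_split_top m s hs hm, List.map_append, List.map_singleton]
  congr 1
  · refine List.map_congr_left (fun i hi => ?_)
    rcases (PySem.List.mem_pyRange_iff_of_pos hs i).mp hi with ⟨hi0, hilt, hdvd⟩
    have hdst : s ∣ ((m - 1) / s) * s - i := by
      refine dvd_sub ⟨(m - 1) / s, mul_comm _ _⟩ (by simpa using hdvd)
    have his : i + s ≤ ((m - 1) / s) * s := by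
      have := Int.le_of_dvd (by omega) hdst
      omega
    have e1 : min m (i + s) = i + s := by omega
    have e2 : min (((m - 1) / s) * s) (i + s) = i + s := by omega
    rw [e1, e2]
  · have : min m (((m - 1) / s) * s + s) = m := by omega
    rw [this]

-- the while loop of Source B accumulates A's blocks back-to-front
theorem altGo_inv (s : Int) (hs : 0 < s) : ∀ (n : Nat) (m : Int) (acc : List (List Int)),
    m.toNat ≤ n → altGo s m acc n = acc ++ (aForm s m).reverse := by
  intro n
  induction n with
  | zero =>
      intro m acc hm
      rw [altGo]
      unfold aForm
      rw [pyRange_pos_eq_nil 0 m s hs (by omega)]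
      simp
  | succ n ih =>
      intro m acc hm
      by_cases hm0 : m > 0
      · rw [altGo, if_pos hm0]
        simp only []
        rw [PySem.Int.floordiv_eq_ediv_of_pos hs]
        have hb := start_bounds m s hs hm0
        rw [ih (((m - 1) / s) * s) _ (by omega)]
        rw [aForm_split_top m s hs hm0, List.reverse_append]
        simp
      · rw [altGo, if_neg hm0]
        unfold aForm
        rw [pyRange_pos_eq_nil 0 m s hs (by omega)]
        simp

-- ===== VERDICT =====
theorem create_blocks_spec : Claim_equal_create_blocks := by
  intro s m _ hpre
  unfold Spec_create_blocks create_blocks create_blocks_alt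
  obtain ⟨hs0, hcase⟩ := hpre
  rcases lt_or_gt_of_ne hs0 with hneg | hpos
  · -- negative step, 0 ≤ m: both sides are []
    rw [pyRange_neg_eq_nil 0 m s hneg (by omega), if_pos (by omega)]
    simp
  · rw [if_neg (by omega), altGo_inv s hpos m.toNat m [] le_rfl]
    rw [foldl_if_append (fun len => len + s > m)
        (fun len => PySem.List.pyRange len m 1)
        (fun len => PySem.List.pyRange len (len + s) 1)]
    simp only [List.nil_append, List.reverse_reverse]
    unfold aForm
    refine List.map_congr_left (fun i _ => ?_)
    by_cases h : i + s > m
    · rw [if_pos h]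
      have : min m (i + s) = m := by omega
      rw [this]
    · rw [if_neg h]
      have : min m (i + s) = i + s := by omega
      rw [this]
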